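-- pv_equiv track=rewrite | github.com/JonaMata/AdventOfCode | 2023/day_23/day_23.py | rec_find_longest_path
-- ===== SOURCE A (Python) =====
-- def rec_find_longest_path(start, goal, visited, edges):
--     if start == goal:
--         return 0
--     options = []
--     cur_edges = edges[start]
--     if goal in cur_edges:
--         return edges[start][goal]
--     for next_node in edges[start]:
--         if next_node not in visited:
--             new_visited = visited.copy()
--             new_visited.add(next_node)
--             new_longest = rec_find_longest_path(next_node, goal, new_visited, edges)
--             if new_longest is not None:
--                 options.append(edges[start][next_node] + new_longest)
--     if len(options) == 0:
--         return None
--     return max(options)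
-- ===== SOURCE B (Python) =====
-- def rec_find_longest_path(start, goal, visited, edges):
--     # Iterative DFS: an explicit stack of frames replaces A's recursion.
--     # Each frame is [vis, pending_items, best, w] where w is the weight of the
--     # edge that led into this frame; a frame's final value (best, or None for a
--     # dead end) is folded into its parent's running best when it is popped.
--     def enter(node, vis, w):
--         # Resolve `node` immediately if possible, else build a stack frame.
--         if node == goal:
--             return ('val', w + 0)
--         nbrs = edges[node]
--         if goal in nbrs:
--             return ('val', w + nbrs[goal])
--         return ('frame', [vis, list(nbrs.items()), None, w])
--
--     kind, top = enter(start, visited, 0)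
--     if kind == 'val':
--         return top
--     stack = [top]
--     while True:
--         vis, items, best, w = stack[-1]
--         if items and items[0][0] in vis:
--             items.pop(0)
--             continue
--         if items:
--             child, cw = items.pop(0)
--             kind, sub = enter(child, vis | {child}, cw)
--             if kind == 'val':
--                 if best is None or sub > best:
--                     stack[-1][2] = sub
--             else:
--                 stack.append(sub)
--         else:
--             stack.pop()
--             res = None if best is None else w + best
--             if not stack:
--                 return res
--             if res is not None:
--                 pbest = stack[-1][2]
--                 if pbest is None or res > pbest:
--                     stack[-1][2] = res
-- ===== Notes on version B (the rewrite author's own statement) =====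
-- stated objective: alternative
-- what changed: A's recursive DFS building an options list and taking max() is replaced by an iterative DFS over an explicit stack of frames, each holding its path's visited set, pending neighbours, the incoming edge weight and a running max that is folded into the parent when the frame is popped.
import Mathlib
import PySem

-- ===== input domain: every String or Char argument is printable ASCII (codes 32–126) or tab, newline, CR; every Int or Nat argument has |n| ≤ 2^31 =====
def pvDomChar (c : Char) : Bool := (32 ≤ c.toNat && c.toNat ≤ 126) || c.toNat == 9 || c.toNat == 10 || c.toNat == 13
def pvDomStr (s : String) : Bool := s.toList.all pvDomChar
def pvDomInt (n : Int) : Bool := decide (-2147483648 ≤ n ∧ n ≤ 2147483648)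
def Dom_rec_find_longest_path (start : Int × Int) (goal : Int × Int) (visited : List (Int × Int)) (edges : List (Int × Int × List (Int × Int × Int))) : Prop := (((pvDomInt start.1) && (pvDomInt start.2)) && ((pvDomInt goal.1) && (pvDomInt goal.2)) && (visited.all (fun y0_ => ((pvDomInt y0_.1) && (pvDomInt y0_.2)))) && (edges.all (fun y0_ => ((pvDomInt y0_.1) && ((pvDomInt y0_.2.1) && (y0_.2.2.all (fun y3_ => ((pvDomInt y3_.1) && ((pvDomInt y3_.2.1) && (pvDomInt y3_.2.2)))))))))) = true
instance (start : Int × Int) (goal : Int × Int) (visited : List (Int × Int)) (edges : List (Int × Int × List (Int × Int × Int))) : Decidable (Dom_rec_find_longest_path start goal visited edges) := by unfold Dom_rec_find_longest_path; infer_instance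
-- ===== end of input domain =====

-- B replaces A's recursive DFS by an iterative DFS over an explicit stack of frames,
-- folding each finished frame's result (a running max instead of an options list) into
-- its parent; objective: alternative decomposition (same cost), return value only.

-- ===== PORT A =====
-- dict lookup on the flattened pair-keyed association lists (first match, as a Python dict)
def pvEdgesGet? (edges : List (Int × Int × List (Int × Int × Int))) (k : Int × Int) : Option (List (Int × Int × Int)) :=
  (edges.find? (fun e => e.1 == k.1 && e.2.1 == k.2)).map (fun e => e.2.2)

def pvAdjGet? (adj : List (Int × Int × Int)) (k : Int × Int) : Option Int :=
  (adj.find? (fun t => t.1 == k.1 && t.2.1 == k.2)).map (fun t => t.2.2)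

-- A's recursion, with a fuel guard making the Lean recursion total (never exhausted inside Pre_);
-- iterating the adjacency items (key with its unique dict value) ports `for n in edges[start]: … edges[start][n]`.
def pvGoA (goal : Int × Int) (edges : List (Int × Int × List (Int × Int × Int))) :
    Nat → (Int × Int) → List (Int × Int) → Option Int
  | 0, _, _ => none
  | fuel + 1, start, visited =>
    if start = goal then some 0
    else
      let cur := (pvEdgesGet? edges start).getD []
      match pvAdjGet? cur goal with
      | some w => some w
      | none =>
        let options := cur.foldl (fun opts t =>
          if visited.contains (t.1, t.2.1) then opts
          else
            match pvGoA goal edges fuel (t.1, t.2.1) (PySem.Set.add visited (t.1, t.2.1)) with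
            | none => opts
            | some v => opts ++ [t.2.2 + v]) []
        if options.isEmpty then none else PySem.List.max? options (fun y => y)

def rec_find_longest_path (start : Int × Int) (goal : Int × Int) (visited : List (Int × Int)) (edges : List (Int × Int × List (Int × Int × Int))) : Option Int :=
  pvGoA goal edges (edges.length + 1) start visited

-- ===== PORT B =====
-- a stack frame: the path's visited set, the pending neighbour items, the running best,
-- the weight of the edge that led here, and the fuel guard for descents from this frame
structure PvFrame where
  vis : List (Int × Int)
  items : List (Int × Int × Int)
  best : Option Int
  w : Int
  fuel : Nat
deriving Repr, DecidableEq

-- the running-max update: `if best is None or x > best: best = x` (None contributes nothing)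
def pvCombine (b : Option Int) (r : Option Int) : Option Int :=
  match r with
  | none => b
  | some x =>
    match b with
    | none => some x
    | some bb => if x > bb then some x else some bb

def pvUpd (p : PvFrame) (r : Option Int) : PvFrame := { p with best := pvCombine p.best r }

-- `enter(node, vis, w)`: resolve immediately, or build a frame (fuel 0 = Lean-only guard, acts as a None child)
def pvEnter (goal : Int × Int) (edges : List (Int × Int × List (Int × Int × Int))) :
    Nat → (Int × Int) → List (Int × Int) → Int → Sum (Option Int) PvFrame
  | 0, _, _, _ => .inl none
  | fuel + 1, node, vis, w =>
    if node = goal then .inl (some (w + 0))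
    else
      let nbrs := (pvEdgesGet? edges node).getD []
      match pvAdjGet? nbrs goal with
      | some gw => .inl (some (w + gw))
      | none => .inr ⟨vis, nbrs, none, w, fuel⟩

-- termination measure for the stack loop
def pvMaxAdj (edges : List (Int × Int × List (Int × Int × Int))) : Nat :=
  edges.foldr (fun e m => max e.2.2.length m) 0

def pvFMeas (edges : List (Int × Int × List (Int × Int × Int))) (f : PvFrame) : Nat :=
  (f.items.length + 1) * (pvMaxAdj edges + 2) ^ f.fuel

def pvSMeas (edges : List (Int × Int × List (Int × Int × Int))) (stack : List PvFrame) : Nat :=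
  (stack.map (pvFMeas edges)).sum

theorem pvAdjLen_le (edges : List (Int × Int × List (Int × Int × Int))) (k : Int × Int) :
    ((pvEdgesGet? edges k).getD []).length ≤ pvMaxAdj edges := by
  induction edges with
  | nil => simp [pvEdgesGet?, pvMaxAdj]
  | cons e es ih =>
    by_cases h : (e.1 == k.1 && e.2.1 == k.2) = true
    · simp only [pvEdgesGet?, pvMaxAdj, List.find?, List.foldr, h]
      simp
    · simp only [pvEdgesGet?, pvMaxAdj, List.find?, List.foldr, h] at ih ⊢
      omega

theorem pvEnter_inr_facts (goal : Int × Int) (edges : List (Int × Int × List (Int × Int × Int)))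
    (fuel : Nat) (node : Int × Int) (vis : List (Int × Int)) (w : Int) (child : PvFrame)
    (h : pvEnter goal edges fuel node vis w = .inr child) :
    child.items.length ≤ pvMaxAdj edges ∧ child.fuel + 1 = fuel := by
  cases fuel with
  | zero => simp [pvEnter] at h
  | succ f =>
    simp only [pvEnter] at h
    split at h
    · simp at h
    · split at h
      · simp at h
      · cases h
        exact ⟨pvAdjLen_le edges node, rfl⟩

-- the four decrease facts for pvRun's stack measure, as named lemmas (cited in decreasing_by)
theorem pvDecA (edges : List (Int × Int × List (Int × Int × Int))) (f p : PvFrame)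
    (rs : List PvFrame) (res : Option Int) :
    pvSMeas edges (pvUpd p res :: rs) < pvSMeas edges (f :: p :: rs) :=
  Nat.lt_add_of_pos_left (Nat.mul_pos (Nat.succ_pos _) (Nat.pow_pos (Nat.succ_pos _)))

theorem pvDecB (edges : List (Int × Int × List (Int × Int × Int))) (f : PvFrame)
    (rest : List PvFrame) (t : Int × Int × Int) (its : List (Int × Int × Int))
    (hits : f.items = t :: its) :
    pvSMeas edges ({ f with items := its } :: rest) < pvSMeas edges (f :: rest) := by
  refine Nat.add_lt_add_right ?_ _
  show (its.length + 1) * (pvMaxAdj edges + 2) ^ f.fuel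
      < (f.items.length + 1) * (pvMaxAdj edges + 2) ^ f.fuel
  rw [hits]
  exact (Nat.mul_lt_mul_right (Nat.pow_pos (Nat.succ_pos _))).mpr (Nat.lt_succ_self _)

theorem pvDecC (edges : List (Int × Int × List (Int × Int × Int))) (f : PvFrame)
    (rest : List PvFrame) (t : Int × Int × Int) (its : List (Int × Int × Int)) (v : Option Int)
    (hits : f.items = t :: its) :
    pvSMeas edges (pvUpd { f with items := its } v :: rest) < pvSMeas edges (f :: rest) := by
  refine Nat.add_lt_add_right ?_ _
  show (its.length + 1) * (pvMaxAdj edges + 2) ^ f.fuel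
      < (f.items.length + 1) * (pvMaxAdj edges + 2) ^ f.fuel
  rw [hits]
  exact (Nat.mul_lt_mul_right (Nat.pow_pos (Nat.succ_pos _))).mpr (Nat.lt_succ_self _)

theorem pvDecD (edges : List (Int × Int × List (Int × Int × Int))) (f child : PvFrame)
    (rest : List PvFrame) (t : Int × Int × Int) (its : List (Int × Int × Int))
    (hits : f.items = t :: its) (hlen : child.items.length ≤ pvMaxAdj edges)
    (hfuel : child.fuel + 1 = f.fuel) :
    pvSMeas edges (child :: { f with items := its } :: rest) < pvSMeas edges (f :: rest) := by
  show (child.items.length + 1) * (pvMaxAdj edges + 2) ^ child.fuel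
      + ((its.length + 1) * (pvMaxAdj edges + 2) ^ f.fuel + (rest.map (pvFMeas edges)).sum)
      < (f.items.length + 1) * (pvMaxAdj edges + 2) ^ f.fuel + (rest.map (pvFMeas edges)).sum
  rw [← Nat.add_assoc]
  refine Nat.add_lt_add_right ?_ _
  rw [hits, ← hfuel]
  have h1 : (child.items.length + 1) * (pvMaxAdj edges + 2) ^ child.fuel
      < (pvMaxAdj edges + 2) ^ (child.fuel + 1) := by
    rw [pow_succ, Nat.mul_comm]
    exact (Nat.mul_lt_mul_left (Nat.pow_pos (Nat.succ_pos _))).mpr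
      (Nat.lt_succ_of_le (Nat.succ_le_succ hlen))
  show _ < ((its.length + 1) + 1) * (pvMaxAdj edges + 2) ^ (child.fuel + 1)
  rw [Nat.succ_mul (its.length + 1),
    Nat.add_comm ((child.items.length + 1) * (pvMaxAdj edges + 2) ^ child.fuel)]
  exact Nat.add_lt_add_left h1 _

-- the explicit-stack while loop of B
def pvRun (goal : Int × Int) (edges : List (Int × Int × List (Int × Int × Int))) :
    List PvFrame → Option Int
  | [] => none
  | f :: rest =>
    match hits : f.items with
    | [] =>
      let res := f.best.map (fun b => f.w + b)
      match rest with
      | [] => res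
      | p :: rs => pvRun goal edges (pvUpd p res :: rs)
    | t :: its =>
      if f.vis.contains (t.1, t.2.1) then
        pvRun goal edges ({ f with items := its } :: rest)
      else
        match henter : pvEnter goal edges f.fuel (t.1, t.2.1) (PySem.Set.add f.vis (t.1, t.2.1)) t.2.2 with
        | .inl v => pvRun goal edges (pvUpd { f with items := its } v :: rest)
        | .inr child => pvRun goal edges (child :: { f with items := its } :: rest)
  termination_by stack => pvSMeas edges stack
  decreasing_by
  · exact pvDecA edges f p rs _
  · exact pvDecB edges f rest t its hits
  · exact pvDecC edges f rest t its _ hits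
  · exact pvDecD edges f child rest t its hits
      (pvEnter_inr_facts _ _ _ _ _ _ _ henter).1 (pvEnter_inr_facts _ _ _ _ _ _ _ henter).2

def rec_find_longest_path_alt (start : Int × Int) (goal : Int × Int) (visited : List (Int × Int)) (edges : List (Int × Int × List (Int × Int × Int))) : Option Int :=
  match pvEnter goal edges (edges.length + 1) start visited 0 with
  | .inl v => v
  | .inr f => pvRun goal edges [f]

-- ===== PRECONDITION & SPEC =====
def pvKeys (edges : List (Int × Int × List (Int × Int × Int))) : List (Int × Int) :=
  edges.map (fun e => (e.1, e.2.1))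

-- the nodes A's DFS can recurse into from v: none if v has no entry (A raises
-- there) or if v's adjacency contains goal (A returns before its loop); else
-- v's neighbours outside the INITIAL visited set (a shortest such walk is a
-- simple path, so this path-free closure reaches exactly the nodes A calls)
def pvNexts (goal : Int × Int) (visited : List (Int × Int))
    (edges : List (Int × Int × List (Int × Int × Int))) (v : Int × Int) : List (Int × Int) :=
  match pvEdgesGet? edges v with
  | none => []
  | some adj =>
    if (pvAdjGet? adj goal).isSome then []
    else (adj.map (fun t => (t.1, t.2.1))).filter (fun n => !visited.contains n)

def pvExpand (goal : Int × Int) (visited : List (Int × Int))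
    (edges : List (Int × Int × List (Int × Int × Int))) (S : List (Int × Int)) : List (Int × Int) :=
  S.foldl (fun acc v => acc ++ (pvNexts goal visited edges v).filter (fun n => !acc.contains n)) S

-- the set of nodes on which A's DFS is ever called (reachability closure; the
-- iteration count edges.length + 2 exceeds the longest simple path of keys)
def pvCalled (start goal : Int × Int) (visited : List (Int × Int))
    (edges : List (Int × Int × List (Int × Int × Int))) : List (Int × Int) :=
  if start = goal then [] else (pvExpand goal visited edges)^[edges.length + 2] [start]

-- Pre_ admits every input on which Python A returns a value. It excludes exactly
-- (a) inputs whose DFS reaches a node with no `edges` entry — there A raises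
-- KeyError (characterised by the goal-pruned reachability closure pvCalled), and
-- (b) association lists with duplicate dict keys, a Lean-encoding corner no
-- Python dict argument can produce (dicts keep the last duplicate, assoc-list
-- lookup the first).
def Pre_rec_find_longest_path (start : Int × Int) (goal : Int × Int) (visited : List (Int × Int)) (edges : List (Int × Int × List (Int × Int × Int))) : Prop :=
  (pvKeys edges).Nodup ∧
  (∀ e ∈ edges, (e.2.2.map (fun t => (t.1, t.2.1))).Nodup) ∧
  (∀ v ∈ pvCalled start goal visited edges, v ∈ pvKeys edges)
instance (start : Int × Int) (goal : Int × Int) (visited : List (Int × Int)) (edges : List (Int × Int × List (Int × Int × Int))) : Decidable (Pre_rec_find_longest_path start goal visited edges) := by unfold Pre_rec_find_longest_path; infer_instance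

def pvWitness_rec_find_longest_path : (Int × Int) × (Int × Int) × (List (Int × Int)) × (List (Int × Int × List (Int × Int × Int))) :=
  ((0, 0), (0, 1), [], [(0, 0, [(0, 1, 3)]), (0, 1, [])])

def Spec_rec_find_longest_path (start : Int × Int) (goal : Int × Int) (visited : List (Int × Int)) (edges : List (Int × Int × List (Int × Int × Int))) (out : Option Int) : Prop := out = rec_find_longest_path_alt start goal visited edges
instance (start : Int × Int) (goal : Int × Int) (visited : List (Int × Int)) (edges : List (Int × Int × List (Int × Int × Int))) (out : Option Int) : Decidable (Spec_rec_find_longest_path start goal visited edges out) := by unfold Spec_rec_find_longest_path; infer_instance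

-- ===== CLAIM (what is proved, stated in full; the proofs are below) =====
def Claim_equal_rec_find_longest_path : Prop := ∀ (start : Int × Int) (goal : Int × Int) (visited : List (Int × Int)) (edges : List (Int × Int × List (Int × Int × Int))), Dom_rec_find_longest_path start goal visited edges → Pre_rec_find_longest_path start goal visited edges → Spec_rec_find_longest_path start goal visited edges (rec_find_longest_path start goal visited edges)

-- ===== LEMMAS AND PROOFS =====

-- the value a child entered with fuel/node/vis/w eventually contributes
def pvEntVal (goal : Int × Int) (edges : List (Int × Int × List (Int × Int × Int)))
    (fuel : Nat) (node : Int × Int) (vis : List (Int × Int)) (w : Int) : Option Int :=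
  (pvGoA goal edges fuel node vis).map (fun v => w + v)

def pvFoldBest (goal : Int × Int) (edges : List (Int × Int × List (Int × Int × Int)))
    (fuel : Nat) (vis : List (Int × Int)) (items : List (Int × Int × Int)) (b : Option Int) : Option Int :=
  items.foldl (fun b t =>
    if vis.contains (t.1, t.2.1) then b
    else pvCombine b (pvEntVal goal edges fuel (t.1, t.2.1) (PySem.Set.add vis (t.1, t.2.1)) t.2.2)) b

def pvFrameVal (goal : Int × Int) (edges : List (Int × Int × List (Int × Int × Int))) (f : PvFrame) : Option Int :=
  (pvFoldBest goal edges f.fuel f.vis f.items f.best).map (fun b => f.w + b)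

def pvContAll (goal : Int × Int) (edges : List (Int × Int × List (Int × Int × Int))) :
    List PvFrame → Option Int → Option Int
  | [], r => r
  | p :: rs, r => pvContAll goal edges rs (pvFrameVal goal edges (pvUpd p r))

theorem pvFoldBest_eq_filterMap (goal : Int × Int) (edges : List (Int × Int × List (Int × Int × Int)))
    (fuel : Nat) (vis : List (Int × Int)) (items : List (Int × Int × Int)) (b : Option Int) :
    pvFoldBest goal edges fuel vis items b =
      (items.filterMap (fun t =>
        if vis.contains (t.1, t.2.1) then none
        else pvEntVal goal edges fuel (t.1, t.2.1) (PySem.Set.add vis (t.1, t.2.1)) t.2.2)).foldl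
        (fun b x => pvCombine b (some x)) b := by
  induction items generalizing b with
  | nil => rfl
  | cons t ts ih =>
    simp only [pvFoldBest, List.foldl_cons, List.filterMap_cons] at ih ⊢
    by_cases h : vis.contains (t.1, t.2.1) = true
    · rw [if_pos h, if_pos h, ih]
    · rw [if_neg h, if_neg h]
      cases hv : pvEntVal goal edges fuel (t.1, t.2.1) (PySem.Set.add vis (t.1, t.2.1)) t.2.2 with
      | none => exact ih b
      | some v => exact ih (pvCombine b (some v))

theorem pvOptions_eq_filterMap (goal : Int × Int) (edges : List (Int × Int × List (Int × Int × Int)))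
    (fuel : Nat) (vis : List (Int × Int)) (items : List (Int × Int × Int)) (opts : List Int) :
    items.foldl (fun opts t =>
        if vis.contains (t.1, t.2.1) then opts
        else
          match pvGoA goal edges fuel (t.1, t.2.1) (PySem.Set.add vis (t.1, t.2.1)) with
          | none => opts
          | some v => opts ++ [t.2.2 + v]) opts
      = opts ++ items.filterMap (fun t =>
          if vis.contains (t.1, t.2.1) then none
          else pvEntVal goal edges fuel (t.1, t.2.1) (PySem.Set.add vis (t.1, t.2.1)) t.2.2) := by
  induction items generalizing opts with
  | nil => simp
  | cons t ts ih =>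
    simp only [List.foldl_cons, List.filterMap_cons]
    simp only [pvEntVal] at ih ⊢
    by_cases h : vis.contains (t.1, t.2.1) = true
    · rw [if_pos h, if_pos h, ih]
    · rw [if_neg h, if_neg h]
      cases hv : pvGoA goal edges fuel (t.1, t.2.1) (PySem.Set.add vis (t.1, t.2.1)) with
      | none => exact ih opts
      | some v => rw [ih]; simp

theorem pvCombine_some_foldl (t : List Int) (x : Int) :
    t.foldl (fun b y => pvCombine b (some y)) (some x) = some (t.foldl max x) := by
  induction t generalizing x with
  | nil => rfl
  | cons y ys ih =>
    have hc : pvCombine (some x) (some y) = some (max x y) := by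
      simp only [pvCombine]
      split_ifs with h
      · congr 1; omega
      · congr 1; omega
    simp only [List.foldl_cons, hc]
    exact ih (max x y)

theorem pvMax_bridge (l : List Int) :
    l.foldl (fun b x => pvCombine b (some x)) none =
      if l.isEmpty then none else PySem.List.max? l (fun y => y) := by
  cases l with
  | nil => rfl
  | cons x t =>
    rw [List.foldl_cons]
    show List.foldl (fun b y => pvCombine b (some y)) (some x) t = _
    rw [pvCombine_some_foldl]
    simp only [List.isEmpty_cons, Bool.false_eq_true, if_false]
    rw [PySem.List.max?_id_cons]

theorem pvEnter_inl (goal : Int × Int) (edges : List (Int × Int × List (Int × Int × Int)))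
    (fuel : Nat) (node : Int × Int) (vis : List (Int × Int)) (w : Int) (v : Option Int)
    (h : pvEnter goal edges fuel node vis w = .inl v) :
    v = pvEntVal goal edges fuel node vis w := by
  cases fuel with
  | zero => simp only [pvEnter] at h; cases h; rfl
  | succ f =>
    simp only [pvEnter] at h
    split at h
    · cases h; simp_all [pvEntVal, pvGoA]
    · rename_i hne
      cases hadj : pvAdjGet? ((pvEdgesGet? edges node).getD []) goal with
      | some gw => rw [hadj] at h; cases h; simp [pvEntVal, pvGoA, hne, hadj]
      | none => rw [hadj] at h; cases h

theorem pvEnter_inr (goal : Int × Int) (edges : List (Int × Int × List (Int × Int × Int)))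
    (fuel : Nat) (node : Int × Int) (vis : List (Int × Int)) (w : Int) (child : PvFrame)
    (h : pvEnter goal edges fuel node vis w = .inr child) :
    pvFrameVal goal edges child = pvEntVal goal edges fuel node vis w := by
  cases fuel with
  | zero => simp [pvEnter] at h
  | succ f =>
    simp only [pvEnter] at h
    split at h
    · cases h
    · rename_i hne
      cases hadj : pvAdjGet? ((pvEdgesGet? edges node).getD []) goal with
      | some gw => rw [hadj] at h; cases h
      | none =>
        rw [hadj] at h
        cases h
        simp only [pvFrameVal, pvEntVal, pvGoA, hne, if_false, hadj]
        rw [pvFoldBest_eq_filterMap, pvMax_bridge,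
          pvOptions_eq_filterMap goal edges f vis _ []]
        rw [List.nil_append]

theorem pvRun_eq (goal : Int × Int) (edges : List (Int × Int × List (Int × Int × Int)))
    (stack : List PvFrame) :
    pvRun goal edges stack =
      match stack with
      | [] => none
      | f :: rest => pvContAll goal edges rest (pvFrameVal goal edges f) := by
  fun_induction pvRun goal edges stack with
  | case1 => rfl
  | case2 =>
    rename_i p hits res
    show Option.map (fun b => p.w + b) p.best = pvFrameVal goal edges p
    simp [pvFrameVal, pvFoldBest, hits]
  | case3 =>
    rename_i p1 hits res p rs ih1
    rw [ih1]
    show pvContAll goal edges rs (pvFrameVal goal edges (pvUpd p (Option.map (fun b => p1.w + b) p1.best)))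
      = pvContAll goal edges rs (pvFrameVal goal edges (pvUpd p (pvFrameVal goal edges p1)))
    rw [show pvFrameVal goal edges p1 = Option.map (fun b => p1.w + b) p1.best from by
      simp [pvFrameVal, pvFoldBest, hits]]
  | case4 =>
    rename_i p rs t its hits h ih1
    rw [ih1]
    show pvContAll goal edges rs (pvFrameVal goal edges ⟨p.vis, its, p.best, p.w, p.fuel⟩)
      = pvContAll goal edges rs (pvFrameVal goal edges p)
    have h' : (t.1, t.2.1) ∈ p.vis := by simpa using h
    congr 1
    simp [pvFrameVal, pvFoldBest, hits, h']
  | case5 =>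
    rename_i p rs t its hits h v henter ih1
    have hv := pvEnter_inl _ _ _ _ _ _ _ henter
    rw [ih1]
    show pvContAll goal edges rs (pvFrameVal goal edges (pvUpd ⟨p.vis, its, p.best, p.w, p.fuel⟩ v))
      = pvContAll goal edges rs (pvFrameVal goal edges p)
    subst hv
    have h' : (t.1, t.2.1) ∉ p.vis := by simpa using h
    congr 1
    simp [pvFrameVal, pvFoldBest, pvUpd, hits, h']
  | case6 =>
    rename_i p rs t its hits h child henter ih1
    have hv := pvEnter_inr _ _ _ _ _ _ _ henter
    rw [ih1]
    show pvContAll goal edges rs (pvFrameVal goal edges (pvUpd ⟨p.vis, its, p.best, p.w, p.fuel⟩ (pvFrameVal goal edges child)))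
      = pvContAll goal edges rs (pvFrameVal goal edges p)
    rw [hv]
    have h' : (t.1, t.2.1) ∉ p.vis := by simpa using h
    congr 1
    simp [pvFrameVal, pvFoldBest, pvUpd, hits, h']

theorem pv_alt_eq (start goal : Int × Int) (visited : List (Int × Int))
    (edges : List (Int × Int × List (Int × Int × Int))) :
    rec_find_longest_path_alt start goal visited edges = rec_find_longest_path start goal visited edges := by
  unfold rec_find_longest_path_alt rec_find_longest_path
  cases h : pvEnter goal edges (edges.length + 1) start visited 0 with
  | inl v =>
    rw [pvEnter_inl _ _ _ _ _ _ _ h]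
    simp [pvEntVal]
  | inr f =>
    show pvRun goal edges [f] = pvGoA goal edges (edges.length + 1) start visited
    rw [pvRun_eq]
    simp only [pvContAll]
    rw [pvEnter_inr _ _ _ _ _ _ _ h]
    simp [pvEntVal]

-- ===== VERDICT (by name: the statement is the Claim_ definition above) =====
theorem rec_find_longest_path_spec : Claim_equal_rec_find_longest_path := by
  intro start goal visited edges _ _
  unfold Spec_rec_find_longest_path
  exact (pv_alt_eq start goal visited edges).symm
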